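-- pv_equiv track=rewrite | github.com/caiocrm/469 | decode.py | normalize_digits_keep_boundaries
-- ===== SOURCE A (Python) =====
-- from typing import List, Tuple
--
-- def normalize_digits_keep_boundaries(s: str) -> Tuple[str, List[int]]:
--     digits = []
--     boundaries = []
--     prev_was_digit = False
--     for ch in s:
--         if ch.isdigit():
--             digits.append(ch)
--             prev_was_digit = True
--         else:
--             if prev_was_digit:
--                 boundaries.append(len(digits))
--             prev_was_digit = False
--     boundaries = sorted(set(b for b in boundaries if 0 < b < len(digits)))
--     return "".join(digits), boundaries
-- ===== SOURCE B (Python) =====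
-- from typing import List, Tuple
--
-- def normalize_digits_keep_boundaries(s: str) -> Tuple[str, List[int]]:
--     # Split s into maximal digit runs by index scanning, then join them and
--     # take cumulative run lengths (excluding the final run) as boundaries.
--     runs = []
--     i, n = 0, len(s)
--     while i < n:
--         if s[i].isdigit():
--             j = i
--             while j < n and s[j].isdigit():
--                 j += 1
--             runs.append(s[i:j])
--             i = j
--         else:
--             i += 1
--     digits = "".join(runs)
--     boundaries = []
--     total = 0
--     for r in runs[:-1]:
--         total += len(r)
--         boundaries.append(total)
--     return digits, boundaries
-- ===== Notes on version B (the rewrite author's own statement) =====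
-- stated objective: simpler
-- what changed: Replaces the per-character flag machine plus the trailing sorted(set(filter(...))) cleanup by a run decomposition: scan out maximal digit runs, join them, and emit the cumulative lengths of all runs but the last as boundaries (no set, no sort, no filter needed).
import Mathlib
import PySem

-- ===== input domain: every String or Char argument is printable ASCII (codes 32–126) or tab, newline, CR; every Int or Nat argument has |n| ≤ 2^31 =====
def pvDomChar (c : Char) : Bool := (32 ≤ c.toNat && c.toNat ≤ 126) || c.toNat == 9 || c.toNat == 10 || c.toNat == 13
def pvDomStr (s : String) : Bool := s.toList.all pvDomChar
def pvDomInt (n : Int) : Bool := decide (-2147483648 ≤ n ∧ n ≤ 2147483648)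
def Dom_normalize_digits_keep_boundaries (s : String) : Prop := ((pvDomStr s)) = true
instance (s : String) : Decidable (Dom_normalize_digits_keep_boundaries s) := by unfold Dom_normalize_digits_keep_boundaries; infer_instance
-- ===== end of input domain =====

-- B replaces A's per-character flag machine + sorted(set(filter(...))) cleanup by a maximal-digit-run
-- decomposition with cumulative run lengths (objective: simpler); return values proved equal on all inputs.

-- ===== PORT A =====
-- the for-loop over the characters, carrying (digits, boundaries, prev_was_digit)
def aLoop : List Char → List Char → List Int → Bool → List Char × List Int
  | [], ds, bs, _ => (ds, bs)
  | c :: rest, ds, bs, prev =>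
    if PySem.Chars.isdigit c then
      aLoop rest (ds ++ [c]) bs true
    else
      aLoop rest ds (if prev then bs ++ [(ds.length : Int)] else bs) false

def normalize_digits_keep_boundaries (s : String) : String × List Int :=
  let p := aLoop s.toList [] [] false
  let ds := p.1
  let bs := p.2
  let bs2 := PySem.List.sorted
    (PySem.Set.ofList (bs.filter (fun b => decide (0 < b) && decide (b < (ds.length : Int)))))
    (fun x => x) false
  (String.ofList ds, bs2)

-- ===== PORT B =====
-- outer while loop of Source B: collect the maximal digit runs (inner while = takeWhile/dropWhile)
def bRuns : List Char → List (List Char)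
  | [] => []
  | c :: cs =>
    if PySem.Chars.isdigit c then
      (c :: cs.takeWhile PySem.Chars.isdigit) :: bRuns (cs.dropWhile PySem.Chars.isdigit)
    else
      bRuns cs
  termination_by l => l.length
  decreasing_by
    · exact Nat.lt_succ_of_le (List.length_dropWhile_le _ _)
    · simp

-- the 'for r in runs[:-1]' accumulation loop of Source B
def bAccum (t : Int) : List (List Char) → List Int
  | [] => []
  | r :: rest => (t + (r.length : Int)) :: bAccum (t + (r.length : Int)) rest

def normalize_digits_keep_boundaries_alt (s : String) : String × List Int :=
  let rs := bRuns s.toList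
  (String.ofList rs.flatten, bAccum 0 rs.dropLast)

-- ===== PRECONDITION & SPEC =====
def Spec_normalize_digits_keep_boundaries (s : String) (out : String × List Int) : Prop := out = normalize_digits_keep_boundaries_alt s
instance (s : String) (out : String × List Int) : Decidable (Spec_normalize_digits_keep_boundaries s out) := by unfold Spec_normalize_digits_keep_boundaries; infer_instance

-- ===== CLAIM (what is proved, stated in full; the proofs are below) =====
def Claim_equal_normalize_digits_keep_boundaries : Prop := ∀ (s : String), Dom_normalize_digits_keep_boundaries s → Spec_normalize_digits_keep_boundaries s (normalize_digits_keep_boundaries s)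

-- ===== LEMMAS AND PROOFS =====

-- does the char list end with a digit? (A's prev_was_digit at loop exit)
def endsDigit (l : List Char) : Bool :=
  (l.getLast?.map PySem.Chars.isdigit).getD false

theorem bRuns_runs_ne_nil (l : List Char) : ∀ r ∈ bRuns l, r ≠ [] := by
  induction l using bRuns.induct with
  | case1 => simp [bRuns]
  | case2 c cs hc ih =>
    intro r hr
    rw [bRuns, if_pos hc] at hr
    rcases List.mem_cons.mp hr with h | h
    · simp [h]
    · exact ih r h
  | case3 c cs hc ih =>
    intro r hr
    rw [bRuns, if_neg hc] at hr
    exact ih r hr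

theorem bRuns_ne_nil_of_mem_digit (l : List Char)
    (h : ∃ c ∈ l, PySem.Chars.isdigit c = true) : bRuns l ≠ [] := by
  induction l using bRuns.induct with
  | case1 => simp at h
  | case2 c cs hc ih => rw [bRuns, if_pos hc]; simp
  | case3 c cs hc ih =>
    rw [bRuns, if_neg hc]
    apply ih
    rcases h with ⟨x, hx, hdx⟩
    rcases List.mem_cons.mp hx with rfl | hx'
    · exact absurd hdx hc
    · exact ⟨x, hx', hdx⟩

-- consuming a run of digit characters
theorem aLoop_digits (r : List Char) (hr : ∀ c ∈ r, PySem.Chars.isdigit c = true) :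
    ∀ (l ds : List Char) (bs : List Int) (p : Bool),
      aLoop (r ++ l) ds bs p = aLoop l (ds ++ r) bs (if r.isEmpty then p else true) := by
  induction r with
  | nil => intro l ds bs p; simp
  | cons c r' ih =>
    intro l ds bs p
    have hc : PySem.Chars.isdigit c = true := hr c (List.mem_cons_self ..)
    have hr' : ∀ x ∈ r', PySem.Chars.isdigit x = true := fun x hx => hr x (List.mem_cons_of_mem _ hx)
    show aLoop (c :: (r' ++ l)) ds bs p = _
    rw [aLoop, if_pos hc, ih hr' l (ds ++ [c]) bs true]
    simp

-- endsDigit ignores a leading char when the rest is nonempty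
theorem endsDigit_cons_of_ne_nil (c : Char) (cs : List Char) (h : cs ≠ []) :
    endsDigit (c :: cs) = endsDigit cs := by
  rcases cs with _ | ⟨b, t⟩
  · exact absurd rfl h
  · simp [endsDigit, List.getLast?_cons_cons]

-- endsDigit ignores a prefix when the suffix is nonempty
theorem endsDigit_append (l1 l2 : List Char) (h : l2 ≠ []) :
    endsDigit (l1 ++ l2) = endsDigit l2 := by
  rcases l2 with _ | ⟨b, t⟩
  · exact absurd rfl h
  · simp [endsDigit, List.getLast?_append_of_ne_nil (l₁ := l1) (l₂ := b :: t) (by simp)]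

-- master characterisation of A's loop from the prev_was_digit = False state
theorem aLoop_main : ∀ (n : Nat) (l : List Char), l.length ≤ n → ∀ (ds : List Char) (bs : List Int),
    aLoop l ds bs false =
      (ds ++ (bRuns l).flatten,
       bs ++ (if endsDigit l then bAccum (ds.length : Int) (bRuns l).dropLast
              else bAccum (ds.length : Int) (bRuns l))) := by
  intro n
  induction n with
  | zero =>
    intro l hl ds bs
    rw [List.length_eq_zero_iff.mp (Nat.le_zero.mp hl)]
    simp [aLoop, bRuns, endsDigit, bAccum]
  | succ n ih =>
    intro l hl ds bs
    rcases l with _ | ⟨c, cs⟩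
    · simp [aLoop, bRuns, endsDigit, bAccum]
    by_cases hc : PySem.Chars.isdigit c = true
    · -- a maximal digit run starts here
      set r : List Char := c :: cs.takeWhile PySem.Chars.isdigit with hrdef
      set rest : List Char := cs.dropWhile PySem.Chars.isdigit with hrestdef
      have hsplit : c :: cs = r ++ rest := by
        simp [hrdef, hrestdef, List.takeWhile_append_dropWhile]
      have hrdig : ∀ x ∈ r, PySem.Chars.isdigit x = true := by
        intro x hx
        rcases List.mem_cons.mp hx with rfl | hx'
        · exact hc
        · exact List.mem_takeWhile_imp hx'
      have hbr : bRuns (c :: cs) = r :: bRuns rest := by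
        rw [bRuns, if_pos hc]
      have h1 : aLoop (c :: cs) ds bs false = aLoop rest (ds ++ r) bs true := by
        rw [hsplit, aLoop_digits r hrdig]
        simp [hrdef]
      have hlenr : 1 ≤ r.length := by simp [hrdef]
      rcases hrest : rest with _ | ⟨c', rest'⟩
      · -- string ends inside the run
        have hend : endsDigit (c :: cs) = true := by
          have : c :: cs = r := by rw [hsplit, hrest, List.append_nil]
          rw [this]
          have hne : r ≠ [] := by simp [hrdef]
          simp [endsDigit, List.getLast?_eq_some_getLast hne, hrdig _ (List.getLast_mem hne)]
        rw [h1, hrest, hbr, hrest, hend]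
        simp [aLoop, bRuns, bAccum]
      · -- run is followed by a non-digit character c'
        have hc' : PySem.Chars.isdigit c' = false := by
          have := List.head_dropWhile_not PySem.Chars.isdigit (l := cs)
          rw [← hrestdef, hrest] at this
          simpa using this
        have h2 : aLoop rest (ds ++ r) bs true =
            aLoop rest' (ds ++ r) (bs ++ [((ds ++ r).length : Int)]) false := by
          rw [hrest, aLoop, if_neg (by simp [hc']), if_pos rfl]
        have hlen' : rest'.length ≤ n := by
          have h3 : (c :: cs).length = r.length + rest.length := by
            rw [hsplit, List.length_append]
          rw [hrest] at h3
          simp at h3 hl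
          omega
        have hbr' : bRuns rest = bRuns rest' := by
          rw [hrest, bRuns, if_neg (by simp [hc'])]
        have hendeq : endsDigit (c :: cs) = endsDigit rest' := by
          rcases rest' with _ | ⟨b, t⟩
          · -- last char of the string is c', a non-digit
            have heq : c :: cs = r ++ [c'] := by rw [hsplit, hrest]
            rw [heq, endsDigit_append r [c'] (by simp)]
            simp [endsDigit, hc']
          · have heq : c :: cs = r ++ c' :: b :: t := by rw [hsplit, hrest]
            rw [heq, endsDigit_append r (c' :: b :: t) (by simp)]
            exact endsDigit_cons_of_ne_nil c' (b :: t) (by simp)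
        rw [h1, h2, ih rest' hlen' (ds ++ r) (bs ++ [((ds ++ r).length : Int)]),
            hbr, hbr', hendeq]
        have hcast : ((ds ++ r).length : Int) = (ds.length : Int) + (r.length : Int) := by
          push_cast [List.length_append]; ring
        by_cases hend' : endsDigit rest' = true
        · have hne : bRuns rest' ≠ [] := by
            apply bRuns_ne_nil_of_mem_digit
            have hne' : rest' ≠ [] := by
              intro hn; rw [hn] at hend'; simp [endsDigit] at hend'
            refine ⟨rest'.getLast hne', List.getLast_mem hne', ?_⟩
            simpa [endsDigit, List.getLast?_eq_some_getLast hne'] using hend'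
          rw [hend', if_pos rfl, if_pos rfl,
              List.dropLast_cons_of_ne_nil hne, bAccum, hcast]
          simp
        · rw [eq_false_of_ne_true hend', if_neg (by simp), if_neg (by simp), bAccum, hcast]
          simp
    · -- non-digit char with prev_was_digit = False: nothing happens
      have hc0 : PySem.Chars.isdigit c = false := eq_false_of_ne_true hc
      have h1 : aLoop (c :: cs) ds bs false = aLoop cs ds bs false := by
        rw [aLoop, if_neg (by simp [hc0]), if_neg (by simp)]
      have hbr : bRuns (c :: cs) = bRuns cs := by rw [bRuns, if_neg (by simp [hc0])]
      have hend : endsDigit (c :: cs) = endsDigit cs := by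
        rcases cs with _ | ⟨b, t⟩
        · simp [endsDigit, hc0]
        · exact endsDigit_cons_of_ne_nil c (b :: t) (by simp)
      rw [h1, ih cs (by simpa using Nat.le_of_succ_le_succ hl) ds bs, hbr, hend]

-- bounds of the accumulated sums
theorem bAccum_mem_bounds : ∀ (rs : List (List Char)) (t x : Int), (∀ r ∈ rs, r ≠ []) →
    x ∈ bAccum t rs → t < x ∧ x ≤ t + (rs.flatten.length : Int) := by
  intro rs
  induction rs with
  | nil => intro t x _ hx; simp [bAccum] at hx
  | cons r rest ih =>
    intro t x hne hx
    have hr1 : 1 ≤ r.length := by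
      have := hne r (List.mem_cons_self ..)
      exact List.length_pos_of_ne_nil this
    rw [bAccum] at hx
    rcases List.mem_cons.mp hx with rfl | hx'
    · constructor
      · omega
      · push_cast [List.flatten_cons, List.length_append]; omega
    · have := ih (t + (r.length : Int)) x (fun q hq => hne q (List.mem_cons_of_mem _ hq)) hx'
      constructor
      · omega
      · push_cast [List.flatten_cons, List.length_append] at this ⊢; omega

theorem bAccum_pairwise : ∀ (rs : List (List Char)) (t : Int), (∀ r ∈ rs, r ≠ []) →
    (bAccum t rs).Pairwise (· < ·) := by
  intro rs
  induction rs with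
  | nil => intro t _; simp [bAccum]
  | cons r rest ih =>
    intro t hne
    rw [bAccum]
    refine List.pairwise_cons.mpr ⟨?_, ih _ (fun q hq => hne q (List.mem_cons_of_mem _ hq))⟩
    intro x hx
    exact (bAccum_mem_bounds rest (t + (r.length : Int)) x
      (fun q hq => hne q (List.mem_cons_of_mem _ hq)) hx).1

-- bAccum over runs[:-1] is the dropLast of bAccum over all runs
theorem bAccum_dropLast : ∀ (rs : List (List Char)) (t : Int),
    bAccum t rs.dropLast = (bAccum t rs).dropLast := by
  intro rs
  induction rs with
  | nil => intro t; simp [bAccum]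
  | cons r rest ih =>
    intro t
    rcases rest with _ | ⟨r2, rest'⟩
    · simp [bAccum]
    · have h1 : (r :: r2 :: rest').dropLast = r :: (r2 :: rest').dropLast :=
        List.dropLast_cons_of_ne_nil (by simp)
      rw [h1]
      show bAccum t (r :: (r2 :: rest').dropLast) = (bAccum t (r :: r2 :: rest')).dropLast
      rw [bAccum, bAccum, ih, List.dropLast_cons_of_ne_nil (by simp [bAccum])]

theorem bAccum_filter_dropLast : ∀ (rs : List (List Char)) (t T : Int), (∀ r ∈ rs, r ≠ []) →
    0 ≤ t → T = t + (rs.flatten.length : Int) →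
    (bAccum t rs).filter (fun b => decide (0 < b) && decide (b < T)) = (bAccum t rs).dropLast := by
  intro rs
  induction rs with
  | nil => intro t T _ _ _; simp [bAccum]
  | cons r rest ih =>
    intro t T hne ht hT
    have hr1 : 1 ≤ r.length := List.length_pos_of_ne_nil (hne r (List.mem_cons_self ..))
    rw [bAccum]
    rcases rest with _ | ⟨r2, rest'⟩
    · -- last run: its cumulative sum equals T and is filtered out
      have : ¬ (t + (r.length : Int) < T) := by
        push_cast [List.flatten_cons, List.flatten_nil, List.append_nil] at hT; omega
      simp [bAccum, this]
    · have hr2 : 1 ≤ r2.length :=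
        List.length_pos_of_ne_nil (hne r2 (List.mem_cons_of_mem _ (List.mem_cons_self ..)))
      have hkeep : (0 < t + (r.length : Int)) ∧ (t + (r.length : Int) < T) := by
        constructor
        · omega
        · push_cast [List.flatten_cons, List.length_append] at hT
          have h0 : (0 : Int) ≤ ((r2 :: rest').flatten.length : Int) := by positivity
          push_cast [List.flatten_cons, List.length_append] at h0 ⊢
          omega
      rw [List.filter_cons_of_pos (by simp [hkeep.1, hkeep.2]),
          ih (t + (r.length : Int)) T
            (fun q hq => hne q (List.mem_cons_of_mem _ hq))
            (by omega)
            (by push_cast [List.flatten_cons, List.length_append] at hT ⊢; omega),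
          List.dropLast_cons_of_ne_nil (by rw [bAccum]; simp)]

-- ===== VERDICT (by name: the statement is the Claim_ definition above) =====
theorem normalize_digits_keep_boundaries_spec : Claim_equal_normalize_digits_keep_boundaries := by
  intro s _
  unfold Spec_normalize_digits_keep_boundaries normalize_digits_keep_boundaries
    normalize_digits_keep_boundaries_alt
  have hmain := aLoop_main s.toList.length s.toList (le_refl _) [] []
  set rs := bRuns s.toList with hrs
  have hrne : ∀ r ∈ rs, r ≠ [] := bRuns_runs_ne_nil s.toList
  have hdlne : ∀ r ∈ rs.dropLast, r ≠ [] :=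
    fun r hr => hrne r ((List.dropLast_sublist (l := rs)).subset hr)
  -- the final boundary list is bAccum 0 rs.dropLast in both endsDigit cases
  have hfilter :
      ((aLoop s.toList [] [] false).2.filter
        (fun b => decide (0 < b) && decide (b < (((aLoop s.toList [] [] false).1).length : Int))))
        = bAccum 0 rs.dropLast := by
    rw [hmain]
    simp only [List.nil_append, List.length_nil, Nat.cast_zero]
    cases hend : endsDigit s.toList with
    | true =>
      rw [if_pos rfl]
      -- every prefix sum over rs.dropLast already passes the filter
      apply List.filter_eq_self.mpr
      intro x hx
      have hb := bAccum_mem_bounds rs.dropLast 0 x hdlne hx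
      have hrsne : rs ≠ [] := by
        apply bRuns_ne_nil_of_mem_digit
        have hne' : s.toList ≠ [] := by
          intro hn; rw [hn] at hend; simp [endsDigit] at hend
        refine ⟨s.toList.getLast hne', List.getLast_mem hne', ?_⟩
        simpa [endsDigit, List.getLast?_eq_some_getLast hne'] using hend
      have hlast : 1 ≤ (rs.getLast hrsne).length :=
        List.length_pos_of_ne_nil (hrne _ (List.getLast_mem hrsne))
      have hsum : rs.flatten.length = rs.dropLast.flatten.length + (rs.getLast hrsne).length := by
        conv_lhs => rw [← List.dropLast_append_getLast hrsne]
        simp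
      have h2 := hb.2
      simp only [Bool.and_eq_true, decide_eq_true_eq]
      exact ⟨hb.1, by omega⟩
    | false =>
      rw [if_neg (by simp), bAccum_dropLast]
      exact bAccum_filter_dropLast rs 0 (rs.flatten.length : Int) hrne (le_refl _) (by omega)
  have hpw : (bAccum 0 rs.dropLast).Pairwise (· < ·) := bAccum_pairwise rs.dropLast 0 hdlne
  have hnd : (bAccum 0 rs.dropLast).Nodup := hpw.imp (fun h => ne_of_lt h)
  simp only []
  rw [hfilter, PySem.Set.ofList_eq_self_of_nodup _ hnd,
      PySem.List.sorted_eq_of_perm_of_pairwise_lt _ _ (fun x => x)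
        (List.Perm.refl _) (by simpa using hpw),
      hmain]
  simp
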